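-- pv_equiv track=rewrite | github.com/DanielFaulkner/FURdb | lib/libFURdatabase.py | findUnmaskedSeq
-- ===== SOURCE A (Python) =====
-- def findUnmaskedSeq(sequence, minsize):
--     """Identifies regions which are unmasked (uppercase) and above the minimum size and returns those positions."""
--     counter = 0
--     startpos=-1
--     endpos=-1
--     remainSeqList = []
--     for i in sequence:
--         if i.isupper() and startpos<0:
--             startpos=counter
--         elif i.islower() and startpos>-1:
--             endpos=counter
--             if endpos-startpos>=minsize:
--                 # Add contig to database
--                 remainSeqList.append([startpos, endpos])
--             # Reset start and end
--             startpos=-1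
--             endpos=-1
--         counter=counter+1
--     return remainSeqList
-- ===== SOURCE B (Python) =====
-- def findUnmaskedSeq(sequence, minsize):
--     """Identifies regions which are unmasked (uppercase) and above the minimum size and returns those positions."""
--     # Stage 1: list every lowercase position (the region terminators).
--     delims = [i for i, c in enumerate(sequence) if c.islower()]
--     # Stage 2: per delimiter, locate the first uppercase position in its segment.
--     res = []
--     segstart = 0
--     for d in delims:
--         segment = sequence[segstart:d]
--         first = None
--         for off, c in enumerate(segment):
--             if c.isupper():
--                 first = segstart + off
--                 break
--         if first is not None and d - first >= minsize:
--             res.append([first, d])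
--         segstart = d + 1
--     return res
-- ===== Notes on version B (the rewrite author's own statement) =====
-- stated objective: alternative
-- what changed: Replaces A's single-pass startpos/endpos state machine with a staged computation: first collect all lowercase delimiter positions, then for each delimiter search its segment for the first uppercase position and emit the region if long enough.
import Mathlib
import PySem

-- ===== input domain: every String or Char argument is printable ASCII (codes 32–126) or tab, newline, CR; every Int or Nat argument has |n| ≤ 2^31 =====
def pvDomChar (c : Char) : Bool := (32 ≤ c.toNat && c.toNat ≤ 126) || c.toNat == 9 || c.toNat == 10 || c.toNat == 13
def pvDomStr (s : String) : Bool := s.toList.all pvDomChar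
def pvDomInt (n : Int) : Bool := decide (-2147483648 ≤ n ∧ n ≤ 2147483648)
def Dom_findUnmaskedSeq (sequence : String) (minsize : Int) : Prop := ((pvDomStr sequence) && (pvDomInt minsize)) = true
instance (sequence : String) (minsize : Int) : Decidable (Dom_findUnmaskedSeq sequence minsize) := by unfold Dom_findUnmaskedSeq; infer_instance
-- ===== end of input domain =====

-- B replaces A's single-pass startpos/endpos state machine by a staged computation:
-- collect every lowercase delimiter position first, then per delimiter search its segment
-- for the first uppercase position; alternative decomposition, same cost.

-- ===== PORT A =====
-- state = (counter, startpos, endpos, remainSeqList), exactly A's loop body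
def aStep (minsize : Int) : Int × Int × Int × List (List Int) → Char → Int × Int × Int × List (List Int) :=
  fun (counter, startpos, endpos, remainSeqList) i =>
    if PySem.Chars.isupper i ∧ startpos < 0 then
      (counter + 1, counter, endpos, remainSeqList)
    else if PySem.Chars.islower i ∧ startpos > -1 then
      let endpos := counter
      let remainSeqList :=
        if endpos - startpos ≥ minsize then remainSeqList ++ [[startpos, endpos]] else remainSeqList
      (counter + 1, -1, -1, remainSeqList)
    else
      (counter + 1, startpos, endpos, remainSeqList)

def findUnmaskedSeq (sequence : String) (minsize : Int) : List (List Int) :=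
  (sequence.toList.foldl (aStep minsize) (0, -1, -1, [])).2.2.2

-- ===== PORT B =====
-- B's inner "for off, c in enumerate(segment): if c.isupper(): first = segstart+off; break"
def firstUpper : List Char → Int → Option Int
  | [], _ => none
  | c :: rest, k => if PySem.Chars.isupper c then some k else firstUpper rest (k + 1)

-- B's per-delimiter loop body over the fold state (segstart, res)
def bStep (cs : List Char) (minsize : Int) : Int × List (List Int) → Int → Int × List (List Int) :=
  fun (segstart, res) d =>
    let segment := PySem.List.slice cs (some segstart) (some d)
    match firstUpper segment segstart with
    | some first => (d + 1, if d - first ≥ minsize then res ++ [[first, d]] else res)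
    | none => (d + 1, res)

def findUnmaskedSeq_alt (sequence : String) (minsize : Int) : List (List Int) :=
  let cs := sequence.toList
  let delims := (PySem.List.enumerate cs).filterMap
    (fun p => if PySem.Chars.islower p.2 then some p.1 else none)
  (delims.foldl (bStep cs minsize) (0, [])).2

-- ===== PRECONDITION & SPEC =====
def Spec_findUnmaskedSeq (sequence : String) (minsize : Int) (out : List (List Int)) : Prop := out = findUnmaskedSeq_alt sequence minsize
instance (sequence : String) (minsize : Int) (out : List (List Int)) : Decidable (Spec_findUnmaskedSeq sequence minsize out) := by unfold Spec_findUnmaskedSeq; infer_instance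

-- ===== CLAIM =====
def Claim_equal_findUnmaskedSeq : Prop := ∀ (sequence : String) (minsize : Int), Dom_findUnmaskedSeq sequence minsize → Spec_findUnmaskedSeq sequence minsize (findUnmaskedSeq sequence minsize)

-- ===== LEMMAS AND PROOFS =====

theorem not_isupper_of_islower (c : Char) (h : PySem.Chars.islower c = true) :
    PySem.Chars.isupper c = false := by
  simp [PySem.Chars.islower, PySem.Chars.isupper, Char.le_def, UInt32.le_iff_toNat_le] at *
  omega

-- Proof-side reference recursion: "skip to next uppercase / scan to terminating lowercase".
mutual
  def bSkip (minsize : Int) : List Char → Int → List (List Int)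
    | [], _ => []
    | c :: rest, i =>
      if PySem.Chars.isupper c then bScan minsize rest i (i + 1) else bSkip minsize rest (i + 1)
  def bScan (minsize : Int) : List Char → Int → Int → List (List Int)
    | [], _, _ => []
    | c :: rest, start, i =>
      if PySem.Chars.islower c then
        if i - start ≥ minsize then [start, i] :: bSkip minsize rest (i + 1)
        else bSkip minsize rest (i + 1)
      else bScan minsize rest start (i + 1)
end

-- A's fold equals the reference recursion.
theorem fold_eq (minsize : Int) (l : List Char) :
    ∀ (i sp ep : Int) (acc : List (List Int)), 0 ≤ i → (sp = -1 ∨ 0 ≤ sp) →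
      (List.foldl (aStep minsize) (i, sp, ep, acc) l).2.2.2 =
        acc ++ (if 0 ≤ sp then bScan minsize l sp i else bSkip minsize l i) := by
  induction l with
  | nil =>
    intro i sp ep acc _ _
    simp [bSkip, bScan]
  | cons c rest ih =>
    intro i sp ep acc hi hsp
    rcases hsp with h | h
    · subst h
      by_cases hu : PySem.Chars.isupper c = true
      · rw [show List.foldl (aStep minsize) (i, -1, ep, acc) (c :: rest)
              = List.foldl (aStep minsize) (i + 1, i, ep, acc) rest by simp [aStep, hu]]
        rw [ih (i + 1) i ep acc (by omega) (Or.inr hi)]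
        simp [bSkip, hu, hi]
      · rw [show List.foldl (aStep minsize) (i, -1, ep, acc) (c :: rest)
              = List.foldl (aStep minsize) (i + 1, -1, ep, acc) rest by simp [aStep, hu]]
        rw [ih (i + 1) (-1) ep acc (by omega) (Or.inl rfl)]
        simp [bSkip, hu]
    · have h1 : ¬ sp < 0 := by omega
      have h2 : sp > -1 := by omega
      by_cases hl : PySem.Chars.islower c = true
      · rw [show List.foldl (aStep minsize) (i, sp, ep, acc) (c :: rest)
              = List.foldl (aStep minsize)
                  (i + 1, -1, -1,
                    if i - sp ≥ minsize then acc ++ [[sp, i]] else acc) rest by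
            simp [aStep, h1, h2, hl]]
        rw [ih (i + 1) (-1) (-1) _ (by omega) (Or.inl rfl)]
        by_cases hm : i - sp ≥ minsize <;> simp [bScan, hl, hm, h]
      · rw [show List.foldl (aStep minsize) (i, sp, ep, acc) (c :: rest)
              = List.foldl (aStep minsize) (i + 1, sp, ep, acc) rest by
            simp [aStep, h1, hl]]
        rw [ih (i + 1) sp ep acc (by omega) (Or.inr h)]
        simp [bScan, hl, h]

-- Delimiter positions of a suffix starting at absolute index i.
def delimsFrom : List Char → Int → List Int
  | [], _ => []
  | c :: rest, i =>
    if PySem.Chars.islower c then i :: delimsFrom rest (i + 1) else delimsFrom rest (i + 1)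

theorem delims_eq (l : List Char) : ∀ (i : Int),
    (PySem.List.enumerate l i).filterMap
      (fun p => if PySem.Chars.islower p.2 then some p.1 else none) = delimsFrom l i := by
  induction l with
  | nil => intro i; simp [delimsFrom, PySem.List.enumerate_nil]
  | cons c rest ih =>
    intro i
    rw [PySem.List.enumerate_cons]
    by_cases h : PySem.Chars.islower c = true <;> simp [delimsFrom, h, ih]

theorem firstUpper_append (xs ys : List Char) : ∀ (k : Int),
    firstUpper (xs ++ ys) k = (firstUpper xs k).orElse (fun _ => firstUpper ys (k + xs.length)) := by
  induction xs with
  | nil => intro k; simp [firstUpper]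
  | cons c rest ih =>
    intro k
    by_cases h : PySem.Chars.isupper c = true
    · simp [firstUpper, h]
    · simp [firstUpper, h, ih]
      ring_nf

theorem slice_eq_mid (cs mid suffix : List Char) (s : Nat) (h : cs.drop s = mid ++ suffix) :
    PySem.List.slice cs (some (s : Int)) (some ((s : Int) + mid.length)) = mid := by
  rw [show ((s : Int) + mid.length) = ((s + mid.length : Nat) : Int) by push_cast; ring]
  rw [PySem.List.slice_natCast, h]
  simp

theorem drop_past (cs mid rest : List Char) (c : Char) (s : Nat)
    (h : cs.drop s = mid ++ c :: rest) : cs.drop (s + mid.length + 1) = rest := by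
  have h2 : (cs.drop s).drop (mid.length + 1) = rest := by
    rw [h, show mid ++ c :: rest = (mid ++ [c]) ++ rest by simp]
    simp
  rw [List.drop_drop] at h2
  rw [Nat.add_assoc]
  exact h2

-- Invariant: processing the delimiters of the suffix at absolute index s + |mid| from
-- fold state (s, acc), where mid (positions s..s+|mid|-1) has no lowercase, gives
-- acc followed by the reference recursion.
theorem fold_bStep_eq (cs : List Char) (minsize : Int) (suffix : List Char) :
    ∀ (mid : List Char) (s : Nat) (acc : List (List Int)),
      cs.drop s = mid ++ suffix →
      (∀ c ∈ mid, PySem.Chars.islower c = false) →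
      ((delimsFrom suffix ((s : Int) + mid.length)).foldl (bStep cs minsize) ((s : Int), acc)).2 =
        acc ++ (match firstUpper mid (s : Int) with
                | some u => bScan minsize suffix u ((s : Int) + mid.length)
                | none => bSkip minsize suffix ((s : Int) + mid.length)) := by
  induction suffix with
  | nil =>
    intro mid s acc _ _
    cases firstUpper mid (s : Int) <;> simp [delimsFrom, bSkip, bScan]
  | cons c rest ih =>
    intro mid s acc hdrop hmid
    by_cases hl : PySem.Chars.islower c = true
    · -- c is a delimiter at absolute position d = s + mid.length
      rw [show delimsFrom (c :: rest) ((s : Int) + mid.length)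
            = ((s : Int) + mid.length) :: delimsFrom rest ((s : Int) + mid.length + 1) by
          simp [delimsFrom, hl]]
      rw [List.foldl_cons]
      rw [show bStep cs minsize ((s : Int), acc) ((s : Int) + mid.length)
            = ((s : Int) + mid.length + 1,
               match firstUpper mid (s : Int) with
               | some u => if (s : Int) + mid.length - u ≥ minsize
                            then acc ++ [[u, (s : Int) + mid.length]] else acc
               | none => acc) by
          simp [bStep, slice_eq_mid cs mid (c :: rest) s hdrop]
          cases firstUpper mid (s : Int) <;> rfl]
      have hdrop' : cs.drop (s + mid.length + 1) = [] ++ rest := by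
        simpa using drop_past cs mid rest c s hdrop
      have := ih [] (s + mid.length + 1) (match firstUpper mid (s : Int) with
               | some u => if (s : Int) + mid.length - u ≥ minsize
                            then acc ++ [[u, (s : Int) + mid.length]] else acc
               | none => acc) hdrop' (by simp)
      push_cast at this ⊢
      simp only [firstUpper, List.length_nil, Nat.cast_zero, add_zero] at this
      rcases hfu : firstUpper mid (s : Int) with _ | u
      · simp only [hfu] at this ⊢
        rw [this]
        simp [bSkip, not_isupper_of_islower c hl]
      · simp only [hfu] at this ⊢
        rw [this]
        by_cases hm : (s : Int) + mid.length - u ≥ minsize <;>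
          simp [bScan, hl, hm]
    · -- c is not lowercase: it joins mid
      rw [show delimsFrom (c :: rest) ((s : Int) + mid.length)
            = delimsFrom rest ((s : Int) + mid.length + 1) by simp [delimsFrom, hl]]
      have hdrop' : cs.drop s = (mid ++ [c]) ++ rest := by simpa using hdrop
      have hmid' : ∀ x ∈ mid ++ [c], PySem.Chars.islower x = false := by
        intro x hx
        rcases List.mem_append.mp hx with h | h
        · exact hmid x h
        · simp at h; subst h; simpa using hl
      have := ih (mid ++ [c]) s acc hdrop' hmid'
      rw [firstUpper_append mid [c] (s : Int)] at this
      simp only [List.length_append, List.length_cons, List.length_nil] at this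
      push_cast at this ⊢
      rcases hfu : firstUpper mid (s : Int) with _ | u
      · by_cases hu : PySem.Chars.isupper c = true
        · simp only [hfu, firstUpper, hu, if_true, Option.orElse] at this ⊢
          rw [show (s : Int) + (mid.length + 1) = (s : Int) + mid.length + 1 by ring] at this
          rw [this]
          simp [bSkip, hu]
        · simp only [hfu, firstUpper, hu, Option.orElse] at this ⊢
          rw [show (s : Int) + (mid.length + 1) = (s : Int) + mid.length + 1 by ring] at this
          rw [this]
          simp [bSkip, hu]
      · simp only [hfu, Option.orElse] at this ⊢
        rw [show (s : Int) + (mid.length + 1) = (s : Int) + mid.length + 1 by ring] at this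
        rw [this]
        simp [bScan, hl]

-- ===== VERDICT =====
theorem findUnmaskedSeq_spec : Claim_equal_findUnmaskedSeq := by
  intro sequence minsize _
  have h2 := fold_bStep_eq sequence.toList minsize sequence.toList [] 0 [] (by simp) (by simp)
  simp only [firstUpper, List.length_nil, Nat.cast_zero, add_zero, List.nil_append] at h2
  unfold Spec_findUnmaskedSeq findUnmaskedSeq
  simp only [findUnmaskedSeq_alt, delims_eq]
  rw [fold_eq minsize sequence.toList 0 (-1) (-1) [] (by omega) (Or.inl rfl)]
  simp [h2]
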